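-- pv_equiv track=rewrite | github.com/emarberg/schurp | keys.py | symmetric_half
-- ===== SOURCE A (Python) =====
-- def symmetric_half(alpha):
--     standardize = sorted(
--         [(i, a) for i, a in enumerate(alpha) if a != 0],
--         key=lambda x: (-x[1], x[0])
--     )
--     ans = list(alpha)
--     for diff, pair in enumerate(standardize):
--         i, _ = pair
--         ans[i] = max(ans[i] - diff, 0)
--     ans = tuple(ans)
--     while ans and ans[-1] == 0:
--         ans = ans[:-1]
--     return ans
-- ===== SOURCE B (Python) =====
-- def symmetric_half(alpha):
--     nonzero = [(j, b) for j, b in enumerate(alpha) if b != 0]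
--
--     def reduced(i, a):
--         if a == 0:
--             return 0
--         diff = sum(1 for j, b in nonzero if b > a or (b == a and j < i))
--         return max(a - diff, 0)
--
--     ans = [reduced(i, a) for i, a in enumerate(alpha)]
--     cut = 0
--     for k, v in enumerate(ans):
--         if v != 0:
--             cut = k + 1
--     return tuple(ans[:cut])
-- ===== Notes on version B (the rewrite author's own statement) =====
-- stated objective: alternative
-- what changed: B computes each nonzero entry's subtraction rank directly by counting entries that sort strictly earlier under the (-value, index) key instead of sorting and enumerating, and trims trailing zeros with one forward scan for the last nonzero position instead of A's while-pop loop.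
import Mathlib
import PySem

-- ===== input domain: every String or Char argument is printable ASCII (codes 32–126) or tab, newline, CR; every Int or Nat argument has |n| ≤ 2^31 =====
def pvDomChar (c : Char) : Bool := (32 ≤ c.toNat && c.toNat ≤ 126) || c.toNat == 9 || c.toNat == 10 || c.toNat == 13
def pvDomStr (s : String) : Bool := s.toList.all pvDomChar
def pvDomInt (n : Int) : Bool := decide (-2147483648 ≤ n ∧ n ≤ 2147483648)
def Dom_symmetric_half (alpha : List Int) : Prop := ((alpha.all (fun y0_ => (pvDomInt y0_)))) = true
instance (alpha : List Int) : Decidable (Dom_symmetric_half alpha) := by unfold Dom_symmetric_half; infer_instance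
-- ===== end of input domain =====

-- B replaces A's sort-then-update pass by a direct per-entry rank count and replaces the
-- while-pop trimming by a single forward scan for the last nonzero position (objective:
-- alternative decomposition, same exact results; not claimed faster).

-- ===== PORT A =====
-- the 'while ans and ans[-1] == 0: ans = ans[:-1]' loop of A
def pyTrim (l : List Int) : List Int :=
  if h : l ≠ [] ∧ PySem.List.pyGet? l (-1) = some 0 then
    pyTrim (PySem.List.slice l none (some (-1)))
  else l
termination_by l.length
decreasing_by
  rw [PySem.List.slice_to_neg_one]
  have : l ≠ [] := h.1
  simpa [List.length_dropLast] using List.length_pos_iff.mpr this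

def symmetric_half (alpha : List Int) : List Int :=
  let standardize := PySem.List.sorted2
    ((PySem.List.enumerate alpha).filter (fun p => p.2 != 0))
    (fun x => -x.2) (fun x => x.1)
  let ans := (PySem.List.enumerate standardize).foldl
    (fun ans dp => PySem.List.pySetD ans dp.2.1
      (max (PySem.List.pyGetD ans dp.2.1 0 - dp.1) 0)) alpha
  pyTrim ans

-- ===== PORT B =====
def symmetric_half_alt (alpha : List Int) : List Int :=
  let nonzero := (PySem.List.enumerate alpha).filter (fun p => p.2 != 0)
  let reduced : Int → Int → Int := fun i a =>
    if a == 0 then 0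
    else max (a - (nonzero.countP (fun q => q.2 > a || (q.2 == a && q.1 < i)) : Int)) 0
  let ans := (PySem.List.enumerate alpha).map (fun p => reduced p.1 p.2)
  let cut := (PySem.List.enumerate ans).foldl
    (fun cut kv => if kv.2 != 0 then kv.1 + 1 else cut) (0 : Int)
  PySem.List.slice ans none (some cut)

-- ===== PRECONDITION & SPEC =====
def Spec_symmetric_half (alpha : List Int) (out : List Int) : Prop := out = symmetric_half_alt alpha
instance (alpha : List Int) (out : List Int) : Decidable (Spec_symmetric_half alpha out) := by unfold Spec_symmetric_half; infer_instance

-- ===== CLAIM (what is proved, stated in full; the proofs are below) =====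
def Claim_equal_symmetric_half : Prop := ∀ (alpha : List Int), Dom_symmetric_half alpha → Spec_symmetric_half alpha (symmetric_half alpha)

-- ===== LEMMAS AND PROOFS =====

-- the strict "comes earlier in A's sort" order on (index, value) pairs, as B counts it
def pvBlt (p q : Int × Int) : Bool := q.2 < p.2 || (p.2 == q.2 && p.1 < q.1)

-- the integer encoding of the lexicographic key (-value, index) for in-range indices
def pvEnc (M : Int) (p : Int × Int) : Int := (-p.2) * M + p.1

lemma pvEnc_lt_iff (M : Int) (p q : Int × Int)
    (hp0 : 0 ≤ p.1) (hpM : p.1 < M) (hq0 : 0 ≤ q.1) (hqM : q.1 < M) :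
    pvEnc M p < pvEnc M q ↔ (q.2 < p.2 ∨ (p.2 = q.2 ∧ p.1 < q.1)) := by
  unfold pvEnc
  constructor
  · intro h
    rcases lt_trichotomy p.2 q.2 with h1 | h1 | h1
    · exfalso
      have h2 : -q.2 + 1 ≤ -p.2 := by omega
      have h3 : (-q.2 + 1) * M ≤ (-p.2) * M :=
        mul_le_mul_of_nonneg_right h2 (by omega)
      have : (-q.2) * M + M ≤ (-p.2) * M := by linarith [h3]
      omega
    · right; constructor; · exact h1
      have : (-p.2) * M = (-q.2) * M := by rw [h1]
      omega
    · left; exact h1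
  · rintro (h1 | ⟨h1, h2⟩)
    · have h2 : -p.2 + 1 ≤ -q.2 := by omega
      have h3 : (-p.2 + 1) * M ≤ (-q.2) * M :=
        mul_le_mul_of_nonneg_right h2 (by omega)
      have : (-p.2) * M + M ≤ (-q.2) * M := by linarith [h3]
      omega
    · have : (-p.2) * M = (-q.2) * M := by rw [h1]
      omega

lemma pvInsertBy_congr {α : Type} (b1 b2 : α → α → Bool) (x : α) (acc : List α)
    (h : ∀ c ∈ acc, b1 x c = b2 x c) :
    PySem.List.insertBy b1 x acc = PySem.List.insertBy b2 x acc := by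
  induction acc with
  | nil => rfl
  | cons y ys ih =>
    simp only [PySem.List.insertBy]
    rw [h y (by simp)]
    by_cases hy : b2 x y = true
    · simp [hy]
    · simp only [hy, if_neg, Bool.not_eq_true] at *
      simp [ih (fun c hc => h c (by simp [hc]))]

lemma pvFoldl_insertBy_congr {α : Type} (b1 b2 : α → α → Bool) :
    ∀ (xs acc : List α),
    (∀ a ∈ xs, ∀ c, (c ∈ acc ∨ c ∈ xs) → b1 a c = b2 a c) →
    xs.foldl (fun acc x => PySem.List.insertBy b1 x acc) acc
      = xs.foldl (fun acc x => PySem.List.insertBy b2 x acc) acc := by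
  intro xs
  induction xs with
  | nil => intro acc _; rfl
  | cons x t ih =>
    intro acc h
    simp only [List.foldl_cons]
    rw [pvInsertBy_congr b1 b2 x acc (fun c hc => h x (by simp) c (Or.inl hc))]
    apply ih
    intro a ha c hc
    apply h a (by simp [ha])
    rcases hc with hc | hc
    · rcases (PySem.List.mem_insertBy _ _ _ _).1 hc with hc | hc
      · right; simp [hc]
      · left; exact hc
    · right; simp [hc]

-- position in a strictly pvBlt-ordered list = number of strictly-smaller elements
lemma pvCountP_pairwise {α : Type} (r : α → α → Bool)
    (hasym : ∀ a b, r a b = true → r b a = false) :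
    ∀ (l : List α), l.Pairwise (fun a b => r a b = true) →
    ∀ (m : Nat) (hm : m < l.length), l.countP (fun q => r q l[m]) = m := by
  intro l
  induction l with
  | nil => intro _ m hm; simp at hm
  | cons x t ih =>
    intro hl m hm
    have hx : ∀ q ∈ t, r x q = true := fun q hq => (List.pairwise_cons.1 hl).1 q hq
    have ht : t.Pairwise (fun a b => r a b = true) := (List.pairwise_cons.1 hl).2
    match m with
    | 0 =>
      simp only [List.getElem_cons_zero, List.countP_cons]
      have hxx : r x x = false := by
        by_cases h : r x x = true
        · exact hasym x x h
        · simpa using h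
      have : t.countP (fun q => r q x) = 0 := by
        rw [List.countP_eq_zero]
        intro q hq
        simp [hasym x q (hx q hq)]
      simp [this, hxx]
    | m + 1 =>
      simp only [List.getElem_cons_succ, List.countP_cons]
      have hm' : m < t.length := by simpa using hm
      rw [ih ht m hm']
      have : r x t[m] = true := hx t[m] (by simp)
      simp [this]

-- pySetD / pyGetD plumbing
lemma pvLength_pySetD (xs : List Int) (i : Int) (v : Int) :
    (PySem.List.pySetD xs i v).length = xs.length :=
  PySem.List.length_pySetD xs i v

lemma pvGetD_pySetD_ne (xs : List Int) (i m : Int) (v d : Int)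
    (hi : 0 ≤ i) (hm : 0 ≤ m) (hne : i ≠ m) :
    PySem.List.pyGetD (PySem.List.pySetD xs i v) m d = PySem.List.pyGetD xs m d := by
  rw [PySem.List.pySetD_of_nonneg _ _ hi]
  simp only [PySem.List.pyGetD, PySem.List.pyGet?, PySem.List.pyIdx?, List.length_set]
  split_ifs with h1 <;> try rfl
  simp only [Option.bind_some]
  rw [List.getElem?_set_ne (by omega)]

lemma pvGetElem?_pySetD_ne (xs : List Int) (i : Int) (v : Int) (k : Nat)
    (hi : 0 ≤ i) (hne : i ≠ (k : Int)) :
    (PySem.List.pySetD xs i v)[k]? = xs[k]? := by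
  rw [PySem.List.pySetD_of_nonneg _ _ hi]
  rw [List.getElem?_set_ne (by omega)]

lemma pvGetElem?_pySetD_self (xs : List Int) (k : Nat) (v : Int) (hk : k < xs.length) :
    (PySem.List.pySetD xs (k : Int) v)[k]? = some v := by
  rw [PySem.List.pySetD_of_nonneg _ _ (by positivity)]
  simp [hk]

-- A's update loop, abstract over the update list U = enumerate(standardize)
def pvStepA (ans : List Int) (dp : Int × (Int × Int)) : List Int :=
  PySem.List.pySetD ans dp.2.1 (max (PySem.List.pyGetD ans dp.2.1 0 - dp.1) 0)

def pvStepB (ans : List Int) (dp : Int × (Int × Int)) : List Int :=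
  PySem.List.pySetD ans dp.2.1 (max (dp.2.2 - dp.1) 0)

lemma pvFoldl_stepB_length : ∀ (U : List (Int × (Int × Int))) (ans : List Int),
    (U.foldl pvStepB ans).length = ans.length := by
  intro U
  induction U with
  | nil => intro ans; rfl
  | cons u t ih => intro ans; rw [List.foldl_cons, ih]; exact pvLength_pySetD ..

lemma pvFoldl_stepA_eq_stepB : ∀ (U : List (Int × (Int × Int))) (ans : List Int),
    (∀ u ∈ U, PySem.List.pyGetD ans u.2.1 0 = u.2.2) →
    (∀ u ∈ U, 0 ≤ u.2.1) →
    U.Pairwise (fun u w => u.2.1 ≠ w.2.1) →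
    U.foldl pvStepA ans = U.foldl pvStepB ans := by
  intro U
  induction U with
  | nil => intro ans _ _ _; rfl
  | cons u t ih =>
    intro ans hval hnn hnd
    simp only [List.foldl_cons]
    have h1 : pvStepA ans u = pvStepB ans u := by
      unfold pvStepA pvStepB
      rw [hval u (by simp)]
    rw [h1]
    apply ih
    · intro w hw
      unfold pvStepB
      rw [pvGetD_pySetD_ne _ _ _ _ _ (hnn u (by simp)) (hnn w (by simp [hw]))
        ((List.pairwise_cons.1 hnd).1 w hw)]
      exact hval w (by simp [hw])
    · intro w hw; exact hnn w (by simp [hw])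
    · exact (List.pairwise_cons.1 hnd).2

lemma pvFoldl_stepB_not_mem : ∀ (U : List (Int × (Int × Int))) (ans : List Int) (k : Nat),
    (∀ u ∈ U, 0 ≤ u.2.1) →
    (∀ u ∈ U, u.2.1 ≠ (k : Int)) →
    (U.foldl pvStepB ans)[k]? = ans[k]? := by
  intro U
  induction U with
  | nil => intro ans k _ _; rfl
  | cons u t ih =>
    intro ans k hnn h
    rw [List.foldl_cons, ih _ k (fun w hw => hnn w (by simp [hw])) (fun w hw => h w (by simp [hw]))]
    exact pvGetElem?_pySetD_ne _ _ _ _ (hnn u (by simp)) (h u (by simp))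

lemma pvFoldl_stepB_mem : ∀ (U : List (Int × (Int × Int))) (ans : List Int) (k : Nat)
    (u : Int × (Int × Int)),
    (∀ w ∈ U, 0 ≤ w.2.1) →
    U.Pairwise (fun u w => u.2.1 ≠ w.2.1) →
    u ∈ U → u.2.1 = (k : Int) → k < ans.length →
    (U.foldl pvStepB ans)[k]? = some (max (u.2.2 - u.1) 0) := by
  intro U
  induction U with
  | nil => intro ans k u _ _ h; simp at h
  | cons w t ih =>
    intro ans k u hnn hnd hu hk hlen
    rw [List.foldl_cons]
    rcases List.mem_cons.1 hu with rfl | hu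
    · rw [pvFoldl_stepB_not_mem t _ k (fun v hv => hnn v (by simp [hv]))
        (fun v hv => by rw [← hk]; exact ((List.pairwise_cons.1 hnd).1 v hv).symm)]
      unfold pvStepB
      rw [hk]
      exact pvGetElem?_pySetD_self _ _ _ hlen
    · apply ih _ k u (fun v hv => hnn v (by simp [hv])) (List.pairwise_cons.1 hnd).2 hu hk
      unfold pvStepB; rw [pvLength_pySetD]; exact hlen

-- trailing-zero trimming: both sides compute (l.reverse.dropWhile (== 0)).reverse
lemma pvPyTrim_eq (l : List Int) :
    pyTrim l = (l.reverse.dropWhile (fun x => x == 0)).reverse := by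
  fun_induction pyTrim l with
  | case1 l h ih =>
    obtain ⟨hne, hlast⟩ := h
    rw [PySem.List.pyGet?_neg_one, List.getLast?_eq_some_getLast hne] at hlast
    have h0 : l.getLast hne = 0 := by injection hlast
    have hsplit : l.dropLast ++ [(0 : Int)] = l := by
      rw [← h0]; exact List.dropLast_append_getLast hne
    rw [PySem.List.slice_to_neg_one] at ih
    rw [PySem.List.slice_to_neg_one, ih]
    conv_rhs => rw [← hsplit]
    simp [List.reverse_append]
  | case2 l h =>
    by_cases hne : l = []
    · simp [hne]
    · push Not at h
      have hlast := h hne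
      rw [PySem.List.pyGet?_neg_one, List.getLast?_eq_some_getLast hne] at hlast
      have h0 : l.getLast hne ≠ 0 := fun hc => hlast (by rw [hc])
      have hsplit : l.dropLast ++ [l.getLast hne] = l := List.dropLast_append_getLast hne
      conv_rhs => rw [← hsplit]
      rw [List.reverse_append]
      simp only [List.reverse_singleton, List.singleton_append, List.dropWhile_cons]
      have hb : (l.getLast hne == 0) = false := by simpa using h0
      rw [hb]
      simp only [Bool.false_eq_true, if_false, List.reverse_cons, List.reverse_reverse]
      exact hsplit.symm

lemma pvCut_eq (l : List Int) :
    (PySem.List.enumerate l).foldl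
      (fun cut kv => if kv.2 != 0 then kv.1 + 1 else cut) (0 : Int)
    = ((l.reverse.dropWhile (fun x => x == 0)).length : Int) := by
  induction l using List.reverseRecOn with
  | nil => rfl
  | append_singleton m x ih =>
    rw [show PySem.List.enumerate (m ++ [x]) = PySem.List.enumerate m 0 ++ PySem.List.enumerate [x] (0 + m.length) from PySem.List.enumerate_append m [x] 0]
    rw [List.foldl_append]
    show (if x != 0 then (0 + (m.length : Int)) + 1 else _) = _
    rw [List.reverse_append]
    by_cases hx : x = 0
    · subst hx
      simp only [List.reverse_singleton, List.singleton_append, List.dropWhile_cons]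
      simpa using ih
    · have hb : (x == 0) = false := by simpa using hx
      have hb' : (x != 0) = true := by simpa using hx
      simp only [List.reverse_singleton, List.singleton_append, List.dropWhile_cons, hb, hb',
        Bool.false_eq_true, if_false, if_true, List.length_cons, List.length_reverse]
      push_cast
      omega

lemma pvTrim_prefix (l : List Int) :
    (l.reverse.dropWhile (fun x => x == 0)).reverse <+: l := by
  refine ⟨(l.reverse.takeWhile (fun x => x == 0)).reverse, ?_⟩
  rw [← List.reverse_append, List.takeWhile_append_dropWhile, List.reverse_reverse]

lemma pvSlice_eq_pyTrim (l : List Int) :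
    PySem.List.slice l none (some ((PySem.List.enumerate l).foldl
      (fun cut kv => if kv.2 != 0 then kv.1 + 1 else cut) (0 : Int))) = pyTrim l := by
  rw [pvCut_eq, pvPyTrim_eq, PySem.List.slice_to_natCast]
  have h := List.prefix_iff_eq_take.1 (pvTrim_prefix l)
  rw [List.length_reverse] at h
  exact h.symm

lemma pvPairwise_enumerate {α : Type} (R : α → α → Prop) :
    ∀ (l : List α) (s : Int), l.Pairwise R →
    (PySem.List.enumerate l s).Pairwise (fun u w => R u.2 w.2) := by
  intro l
  induction l with
  | nil => intro s _; simp [PySem.List.enumerate_nil]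
  | cons x t ih =>
    intro s hl
    rw [PySem.List.enumerate_cons, List.pairwise_cons]
    refine ⟨?_, ih (s + 1) (List.pairwise_cons.1 hl).2⟩
    intro w hw
    obtain ⟨k, hk, rfl⟩ := (PySem.List.mem_enumerate_iff _ _ _).1 hw
    exact (List.pairwise_cons.1 hl).1 _ (by simp)

lemma pvBlt_asym (a b : Int × Int) (h : pvBlt a b = true) : pvBlt b a = false := by
  simp only [pvBlt, Bool.or_eq_true, Bool.and_eq_true, decide_eq_true_eq, beq_iff_eq] at *
  simp only [Bool.or_eq_false_iff, Bool.and_eq_false_iff]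
  constructor
  · simp only [decide_eq_false_iff_not]; omega
  · by_cases hv : b.2 = a.2
    · right; simp only [decide_eq_false_iff_not]; omega
    · left; simp [hv]

-- the core: the two pre-trim lists are equal
lemma pvAns_eq (alpha : List Int) :
    (PySem.List.enumerate (PySem.List.sorted2
        ((PySem.List.enumerate alpha).filter (fun p => p.2 != 0))
        (fun x => -x.2) (fun x => x.1))).foldl pvStepA alpha
    = (PySem.List.enumerate alpha).map (fun p =>
        if p.2 == 0 then 0
        else max (p.2 - (((PySem.List.enumerate alpha).filter (fun p => p.2 != 0)).countP
          (fun q => q.2 > p.2 || (q.2 == p.2 && q.1 < p.1)) : Int)) 0) := by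
  set M : Int := (alpha.length : Int) with hM
  set P : List (Int × Int) := (PySem.List.enumerate alpha).filter (fun p => p.2 != 0) with hP
  set S : List (Int × Int) := PySem.List.sorted2 P (fun x => -x.2) (fun x => x.1) with hS
  have hPmem : ∀ p ∈ P, ∃ j : Nat, ∃ hj : j < alpha.length,
      p = ((j : Int), alpha[j]) ∧ alpha[j] ≠ 0 := by
    intro p hp
    rw [hP, List.mem_filter] at hp
    obtain ⟨hp1, hp2⟩ := hp
    obtain ⟨j, hj, rfl⟩ := (PySem.List.mem_enumerate_iff _ _ _).1 hp1
    exact ⟨j, hj, by simp, by simpa using hp2⟩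
  have hSP : S.Perm P := PySem.List.sorted2_perm P _ _ false
  have hSmem : ∀ p ∈ S, ∃ j : Nat, ∃ hj : j < alpha.length,
      p = ((j : Int), alpha[j]) ∧ alpha[j] ≠ 0 := fun p hp => hPmem p (hSP.mem_iff.1 hp)
  -- S is the sort of P by the single integer key pvEnc M
  have hsorted : S = PySem.List.sorted P (pvEnc M) false := by
    rw [hS]
    show P.foldl (fun acc x => PySem.List.insertBy _ x acc) []
      = P.foldl (fun acc x => PySem.List.insertBy _ x acc) []
    apply pvFoldl_insertBy_congr
    intro a ha c hc
    have hc : c ∈ P := hc.resolve_left (by simp)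
    obtain ⟨j, hj, rfl, _⟩ := hPmem a ha
    obtain ⟨j', hj', rfl, _⟩ := hPmem c hc
    have hiff := pvEnc_lt_iff M ((j : Int), alpha[j]) ((j' : Int), alpha[j'])
      (by positivity) (by simpa [hM] using hj) (by positivity) (by simpa [hM] using hj')
    simp only [Bool.false_eq_true, if_false]
    beta_reduce
    rw [show decide (pvEnc M ((j : Int), alpha[j]) < pvEnc M ((j' : Int), alpha[j'])) = decide (alpha[j'] < alpha[j] ∨ (alpha[j] = alpha[j'] ∧ (j : Int) < (j' : Int))) from by rw [decide_eq_decide]; exact hiff]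
    by_cases h1 : alpha[j'] < alpha[j] <;>
      by_cases h2 : alpha[j] = alpha[j'] <;>
        by_cases h3 : (j : Int) < (j' : Int) <;>
          (simp [h1, h2, h3]; try omega)
  -- S is strictly increasing for pvBlt
  have hfstne : S.Pairwise (fun p q => p.1 ≠ q.1) := by
    have hPlt : P.Pairwise (fun p q => p.1 < q.1) :=
      List.Pairwise.sublist List.filter_sublist (PySem.List.pairwise_lt_enumerate alpha 0)
    have hnodup : (P.map Prod.fst).Nodup :=
      List.pairwise_map.2 (hPlt.imp (fun h => ne_of_lt h))
    have hnodupS : (S.map Prod.fst).Nodup := ((hSP.map Prod.fst).nodup_iff).2 hnodup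
    exact List.pairwise_map.1 hnodupS
  have hpair : S.Pairwise (fun p q => pvBlt p q = true) := by
    have h1 : S.Pairwise (fun p q => pvEnc M p ≤ pvEnc M q) := by
      rw [hsorted]; exact PySem.List.sorted_pairwise P (pvEnc M)
    refine (h1.and hfstne).imp_of_mem ?_
    intro p q hp hq ⟨hle, hne⟩
    obtain ⟨j, hj, rfl, _⟩ := hSmem p hp
    obtain ⟨j', hj', rfl, _⟩ := hSmem q hq
    have hiff := pvEnc_lt_iff M ((j' : Int), alpha[j']) ((j : Int), alpha[j])
      (by positivity) (by simpa [hM] using hj') (by positivity) (by simpa [hM] using hj)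
    have hnlt : ¬ (pvEnc M ((j' : Int), alpha[j']) < pvEnc M ((j : Int), alpha[j])) := by omega
    rw [hiff] at hnlt
    simp only [pvBlt, Bool.or_eq_true, Bool.and_eq_true, decide_eq_true_eq, beq_iff_eq]
    simp only [ne_eq] at hne
    by_cases hv : alpha[j] = alpha[j']
    · right; exact ⟨hv, by omega⟩
    · left; omega
  -- replace A's read-update loop by the value-carrying loop
  set U : List (Int × (Int × Int)) := PySem.List.enumerate S 0 with hU
  have hUmem : ∀ u ∈ U, ∃ m : Nat, ∃ hm : m < S.length, u = ((m : Int), S[m]) := by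
    intro u hu
    obtain ⟨m, hm, rfl⟩ := (PySem.List.mem_enumerate_iff _ _ _).1 hu
    exact ⟨m, hm, by simp⟩
  have hnn : ∀ u ∈ U, 0 ≤ u.2.1 := by
    intro u hu
    obtain ⟨m, hm, rfl⟩ := hUmem u hu
    obtain ⟨j, hj, he, _⟩ := hSmem S[m] (by simp)
    simp [he]
  have hnd : U.Pairwise (fun u w => u.2.1 ≠ w.2.1) := pvPairwise_enumerate _ S 0 hfstne
  have hval : ∀ u ∈ U, PySem.List.pyGetD alpha u.2.1 0 = u.2.2 := by
    intro u hu
    obtain ⟨m, hm, rfl⟩ := hUmem u hu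
    obtain ⟨j, hj, he, _⟩ := hSmem S[m] (by simp)
    simp only [he, PySem.List.pyGetD_natCast]
    exact List.getD_eq_getElem _ _ hj
  rw [show U.foldl pvStepA alpha = U.foldl pvStepB alpha from
    pvFoldl_stepA_eq_stepB U alpha hval hnn hnd]
  -- pointwise comparison
  apply List.ext_getElem?
  intro k
  by_cases hk : k < alpha.length
  case neg =>
    rw [List.getElem?_eq_none, List.getElem?_eq_none]
    · rw [List.length_map, PySem.List.length_enumerate]; omega
    · rw [pvFoldl_stepB_length]; omega
  case pos =>
    have hrhs : ((PySem.List.enumerate alpha).map (fun p =>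
        if p.2 == 0 then 0
        else max (p.2 - (P.countP (fun q => q.2 > p.2 || (q.2 == p.2 && q.1 < p.1)) : Int)) 0))[k]?
        = some (if alpha[k] == 0 then 0
            else max (alpha[k] - (P.countP (fun q => q.2 > alpha[k] || (q.2 == alpha[k] && q.1 < (k : Int))) : Int)) 0) := by
      rw [List.getElem?_map, PySem.List.getElem?_enumerate, List.getElem?_eq_getElem hk]
      simp
    rw [hrhs]
    by_cases hz : alpha[k] = 0
    · rw [pvFoldl_stepB_not_mem U alpha k hnn ?_]
      · rw [List.getElem?_eq_getElem hk]
        simp [hz]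
      · intro u hu hk'
        obtain ⟨m, hm, rfl⟩ := hUmem u hu
        obtain ⟨j, hj, he, hnz⟩ := hSmem S[m] (by simp)
        rw [he] at hk'
        simp only at hk'
        have : j = k := by exact_mod_cast hk'
        subst this
        exact hnz hz
    · have hp0 : ((k : Int), alpha[k]) ∈ P := by
        rw [hP, List.mem_filter]
        refine ⟨(PySem.List.mem_enumerate_iff _ _ _).2 ⟨k, hk, by simp⟩, by simpa using hz⟩
      have hp0S : ((k : Int), alpha[k]) ∈ S := hSP.mem_iff.2 hp0
      obtain ⟨m, hm, hSm⟩ := List.getElem_of_mem hp0S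
      have hu : ((m : Int), S[m]) ∈ U := by
        rw [hU]
        exact (PySem.List.mem_enumerate_iff _ _ _).2 ⟨m, hm, by simp⟩
      rw [pvFoldl_stepB_mem U alpha k ((m : Int), S[m]) hnn hnd hu (by rw [hSm]) hk]
      have hcount : P.countP (fun q => q.2 > alpha[k] || (q.2 == alpha[k] && q.1 < (k : Int))) = m := by
        rw [← hSP.countP_eq]
        have := pvCountP_pairwise pvBlt pvBlt_asym S hpair m hm
        rw [hSm] at this
        rw [← this]
        apply List.countP_congr
        intro q _
        simp [pvBlt]
      rw [hSm]
      simp only [hcount]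
      have hbz : (alpha[k] == 0) = false := by simpa using hz
      rw [hbz]
      simp

-- ===== VERDICT (by name: the statement is the Claim_ definition above) =====
theorem symmetric_half_spec : Claim_equal_symmetric_half := by
  intro alpha _
  unfold Spec_symmetric_half symmetric_half symmetric_half_alt
  simp only []
  rw [show (fun (ans : List Int) (dp : Int × (Int × Int)) => PySem.List.pySetD ans dp.2.1
      (max (PySem.List.pyGetD ans dp.2.1 0 - dp.1) 0)) = pvStepA from rfl]
  rw [pvAns_eq, pvSlice_eq_pyTrim]
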